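-- pv_equiv track=rewrite | github.com/Vijay6923/pwbootcamp | Quiz1/circular_traversal.py | circular_traversal
-- ===== SOURCE A (Python) =====
-- def circular_traversal(array, start_index):
--
--     n = len(array)
--     traversal = []
--     current_index = start_index % n
--
--     for _ in range(n):
--         traversal.append(array[current_index])
--         current_index = (current_index + 1) % n
--
--     return traversal
-- ===== SOURCE B (Python) =====
-- def circular_traversal(array, start_index):
--     s = start_index % len(array)
--     return list(array[s:] + array[:s])
-- ===== Notes on version B (the rewrite author's own statement) =====
-- stated objective: simpler
-- what changed: Replaces the element-by-element modular-index loop with one modulo to find the split point and a slice concatenation array[s:] + array[:s].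
import Mathlib
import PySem

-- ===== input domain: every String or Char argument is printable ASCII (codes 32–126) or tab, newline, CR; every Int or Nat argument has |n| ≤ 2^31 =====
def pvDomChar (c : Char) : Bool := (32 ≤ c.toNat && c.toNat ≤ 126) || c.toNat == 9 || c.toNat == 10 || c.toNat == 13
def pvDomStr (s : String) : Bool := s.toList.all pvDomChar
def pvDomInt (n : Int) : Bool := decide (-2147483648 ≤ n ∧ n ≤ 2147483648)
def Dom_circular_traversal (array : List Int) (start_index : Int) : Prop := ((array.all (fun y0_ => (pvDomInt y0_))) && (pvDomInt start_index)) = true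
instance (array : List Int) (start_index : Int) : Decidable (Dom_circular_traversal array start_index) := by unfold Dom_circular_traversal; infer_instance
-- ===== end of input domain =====

-- B replaces A's element-by-element modular-index loop with one modulo and a slice
-- concatenation array[s:] + array[:s] (objective: simpler).

-- ===== PORT A =====
-- loop `for _ in range(n): traversal.append(array[current_index]); current_index = (current_index+1) % n`
-- as a foldl over List.range n carrying (traversal, current_index).
-- array[current_index] is ported with pyGetD: exact here because current_index is always
-- in [0, n) (it is a `% n` value and Pre_ gives n > 0), so Python never raises.
def circular_traversal (array : List Int) (start_index : Int) : List Int :=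
  let n : Int := (array.length : Int)
  let current_index : Int := PySem.Int.mod start_index n
  ((List.range array.length).foldl
    (fun (st : List Int × Int) _ =>
      (st.1 ++ [PySem.List.pyGetD array st.2 0], PySem.Int.mod (st.2 + 1) n))
    ([], current_index)).1

-- ===== PORT B =====
def circular_traversal_alt (array : List Int) (start_index : Int) : List Int :=
  let s : Int := PySem.Int.mod start_index (array.length : Int)
  PySem.List.slice array (some s) none ++ PySem.List.slice array none (some s)

-- ===== PRECONDITION & SPEC =====
-- Pre_ excludes only the empty list, on which Python A raises ZeroDivisionError at `start_index % 0`.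
def Pre_circular_traversal (array : List Int) (start_index : Int) : Prop := array ≠ []
instance (array : List Int) (start_index : Int) : Decidable (Pre_circular_traversal array start_index) := by unfold Pre_circular_traversal; infer_instance
def pvWitness_circular_traversal : List Int × Int := ([1, 2, 3, 4], 6)

def Spec_circular_traversal (array : List Int) (start_index : Int) (out : List Int) : Prop := out = circular_traversal_alt array start_index
instance (array : List Int) (start_index : Int) (out : List Int) : Decidable (Spec_circular_traversal array start_index out) := by unfold Spec_circular_traversal; infer_instance

-- ===== CLAIM (what is proved, stated in full; the proofs are below) =====
def Claim_equal_circular_traversal : Prop := ∀ (array : List Int) (start_index : Int), Dom_circular_traversal array start_index → Pre_circular_traversal array start_index → Spec_circular_traversal array start_index (circular_traversal array start_index)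

-- ===== LEMMAS AND PROOFS =====

-- A's loop, run m times from index i (as a Nat), appends exactly the elements at
-- indices (i+0)%n, (i+1)%n, …, (i+m-1)%n, and leaves the index at (i+m)%n.
theorem loopA (array : List Int) (h : array ≠ []) (m : Nat) :
    ∀ (acc : List Int) (i : Nat), i < array.length →
    ((List.range m).foldl
      (fun (st : List Int × Int) _ =>
        (st.1 ++ [PySem.List.pyGetD array st.2 0], PySem.Int.mod (st.2 + 1) (array.length : Int)))
      (acc, (i : Int)))
    = (acc ++ (List.range m).map (fun k => array.getD ((i + k) % array.length) 0),
       (((i + m) % array.length : Nat) : Int)) := by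
  have hn : 0 < array.length := List.length_pos_of_ne_nil h
  induction m with
  | zero =>
    intro acc i hi
    simp [Nat.mod_eq_of_lt hi]
  | succ m ih =>
    intro acc i hi
    rw [List.range_succ, List.foldl_append, ih acc i hi]
    simp only [List.foldl_cons, List.foldl_nil, List.map_append, List.map_cons, List.map_nil,
      Prod.mk.injEq]
    constructor
    · rw [PySem.List.pyGetD_natCast]
      simp [List.append_assoc]
    · have : ((((i + m) % array.length : Nat) : Int) + 1)
          = ((((i + m) % array.length + 1 : Nat)) : Int) := by push_cast; ring
      rw [this, PySem.Int.mod_natCast]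
      congr 1
      conv_rhs => rw [← Nat.add_assoc, Nat.add_mod]
      conv_lhs => rw [Nat.add_mod]
      simp

-- The rotation sequence equals the slice concatenation.
theorem rotation_eq (array : List Int) (s : Nat) (hs : s < array.length) :
    (List.range array.length).map (fun k => array.getD ((s + k) % array.length) 0)
      = array.drop s ++ array.take s := by
  apply List.ext_getElem
  · simp; omega
  · intro j hj1 hj2
    have hn : array.length ≠ 0 := by omega
    simp only [List.getElem_map, List.getElem_range]
    have hjn : j < array.length := by simpa using hj1
    rw [List.getElem_append]
    by_cases hc : j < (array.drop s).length
    · simp only [hc, dif_pos]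
      have hlt : s + j < array.length := by simp at hc; omega
      rw [Nat.mod_eq_of_lt hlt, List.getElem_drop,
        List.getD_eq_getElem array 0 hlt]
    · rw [dif_neg hc]
      have hdl : (array.drop s).length = array.length - s := by simp
      have h1 : s + j - array.length < array.length := by omega
      have hmod : (s + j) % array.length = s + j - array.length := by
        have : s + j < 2 * array.length := by omega
        rw [Nat.mod_eq_sub_mod (by omega), Nat.mod_eq_of_lt (by omega)]
      rw [hmod, List.getElem_take, List.getD_eq_getElem array 0 h1]
      congr 1
      omega

-- ===== VERDICT (by name: the statement is the Claim_ definition above) =====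
theorem circular_traversal_spec : Claim_equal_circular_traversal := by
  intro array start_index _ hpre
  simp only [Spec_circular_traversal, circular_traversal, circular_traversal_alt]
  have hn : 0 < array.length := List.length_pos_of_ne_nil hpre
  have hnz : (0 : Int) < (array.length : Int) := by exact_mod_cast hn
  set s : Int := PySem.Int.mod start_index (array.length : Int) with hsdef
  have hs0 : 0 ≤ s := PySem.Int.mod_nonneg _ hnz
  have hslt : s < (array.length : Int) := PySem.Int.mod_lt _ hnz
  have hcast : s = ((s.toNat : Nat) : Int) := by omega
  have hltn : s.toNat < array.length := by omega
  rw [hcast, loopA array hpre array.length [] s.toNat hltn]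
  simp only [List.nil_append]
  rw [rotation_eq array s.toNat hltn, PySem.List.slice_from_natCast,
    PySem.List.slice_to_natCast]
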